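-- pv_equiv track=rewrite | github.com/benjfield/advent_of_code | advent/year_2020/day_14.py | count_addresses
-- ===== SOURCE A (Python) =====
-- def count_addresses(used_addresses, current_address, current_index):
--     if current_address not in used_addresses:
--         if current_index == len(current_address):
--             used_addresses.add(current_address)
--             return 1
--         else:
--             if current_address[current_index] == "X":
--                 used_addresses.add(current_address)
--                 total = 0
--                 for replacement_value in ["0", "1"]:
--                     this_address = current_address[:current_index] + replacement_value + current_address[current_index + 1:]
--                     total += count_addresses(used_addresses, this_address, current_index + 1)
--                 return total
--             else:
--                 return count_addresses(used_addresses, current_address, current_index + 1)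
--     else:
--         return 0
-- ===== SOURCE B (Python) =====
-- def count_addresses(used_addresses, current_address, current_index):
--     total = 0
--     stack = [(current_address, current_index)]
--     while stack:
--         addr, i = stack.pop()
--         if addr in used_addresses:
--             continue
--         j = addr.find("X", i)
--         if j == -1:
--             used_addresses.add(addr)
--             total += 1
--         else:
--             used_addresses.add(addr)
--             stack.append((addr[:j] + "1" + addr[j + 1:], j + 1))
--             stack.append((addr[:j] + "0" + addr[j + 1:], j + 1))
--     return total
-- ===== Notes on version B (the rewrite author's own statement) =====
-- stated objective: alternative
-- what changed: Per-character recursion (one call per index, branching at each 'X') replaced by an iterative DFS over an explicit stack whose step jumps directly to the next 'X' via str.find, adding the same partial addresses to the set.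
-- outside the precondition, e.g. on count_addresses(set(), 'X0', -1): A returns 2, B returns 1
import Mathlib
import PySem

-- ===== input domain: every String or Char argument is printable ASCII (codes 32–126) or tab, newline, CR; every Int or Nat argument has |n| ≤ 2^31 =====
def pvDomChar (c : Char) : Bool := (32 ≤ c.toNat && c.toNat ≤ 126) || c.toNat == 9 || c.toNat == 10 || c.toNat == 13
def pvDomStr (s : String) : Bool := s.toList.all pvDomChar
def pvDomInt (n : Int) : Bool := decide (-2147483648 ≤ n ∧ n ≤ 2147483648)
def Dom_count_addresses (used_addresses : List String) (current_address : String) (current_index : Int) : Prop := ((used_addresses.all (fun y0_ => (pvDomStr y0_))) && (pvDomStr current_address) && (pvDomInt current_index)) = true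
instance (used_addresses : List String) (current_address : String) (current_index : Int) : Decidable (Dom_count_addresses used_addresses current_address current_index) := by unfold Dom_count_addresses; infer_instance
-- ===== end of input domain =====

-- B replaces A's per-character recursion by an iterative DFS over an explicit stack that jumps
-- straight to the next 'X' with str.find (alternative decomposition, same cost; the set mutation
-- that both Pythons perform on used_addresses is identical and the equivalence is about the return value).

-- a[:i] + rep + a[i+1:]  (this expression appears verbatim in both Pythons)
def pvBuild (a : List Char) (i : Int) (rep : List Char) : List Char :=
  PySem.List.slice a none (some i) ++ rep ++ PySem.List.slice a (some (i + 1)) none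

-- ===== PORT A =====
-- fuel = recursion depth bound, a pure totality device: the top-level call passes enough for
-- every recursion (each call increases current_index by 1 towards len, which ends the recursion)
def pvGoA : Nat → List (List Char) → List Char → Int → List (List Char) × Int
  | 0, used, _, _ => (used, 0)
  | fuel + 1, used, a, i =>
    if PySem.Set.contains used a then (used, 0)          -- "current_address not in used_addresses" (negated)
    else if i = (a.length : Int) then (PySem.Set.add used a, 1)
    else if i < 0 ∨ (a.length : Int) ≤ i then (used, 0)
      -- totality guard: here Python's current_address[current_index] raises IndexError (i > len)
      -- or wraps around (i < 0); both are outside Pre_count_addresses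
    else
      if PySem.List.pyGetD a i ' ' = 'X' then            -- current_address[current_index] == "X" (in range by the guard)
        let used1 := PySem.Set.add used a
        -- for replacement_value in ["0", "1"]: total += count_addresses(...)  (the two iterations written out)
        let r0 := pvGoA fuel used1 (pvBuild a i ['0']) (i + 1)
        let r1 := pvGoA fuel r0.1 (pvBuild a i ['1']) (i + 1)
        (r1.1, 0 + r0.2 + r1.2)
      else
        pvGoA fuel used a (i + 1)

def count_addresses (used_addresses : List String) (current_address : String) (current_index : Int) : Int :=
  (pvGoA ((((current_address.toList.length : Int) - current_index).toNat) + 1)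
    (used_addresses.map String.toList) current_address.toList current_index).2

-- ===== PORT B =====
-- fuel = loop iteration bound, a pure totality device: the top-level call passes enough for
-- every iteration (the weight 3^(len-i) summed over the stack strictly decreases each iteration)
def pvGoB : Nat → List (List Char) → List (List Char × Int) → Int → List (List Char) × Int
  | _, used, [], total => (used, total)                                -- while stack: exhausted
  | 0, used, _, total => (used, total)
  | fuel + 1, used, (a, i) :: rest, total =>
    if PySem.Set.contains used a then pvGoB fuel used rest total      -- if addr in used_addresses: continue
    else
      let j := PySem.Chars.findFrom a ['X'] i none                    -- j = addr.find("X", i)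
      if j = -1 then pvGoB fuel (PySem.Set.add used a) rest (total + 1)
      else
        -- append the "1" child then the "0" child: the "0" child ends on top of the stack
        pvGoB fuel (PySem.Set.add used a)
          ((pvBuild a j ['0'], j + 1) :: (pvBuild a j ['1'], j + 1) :: rest) total

def count_addresses_alt (used_addresses : List String) (current_address : String) (current_index : Int) : Int :=
  (pvGoB (3 ^ (min (((current_address.toList.length : Int) - current_index).toNat)
      (current_address.toList.length + 1)) + 1)
    (used_addresses.map String.toList) [(current_address.toList, current_index)] 0).2

-- ===== PRECONDITION & SPEC =====
-- Pre_ covers the natural domain 0 ≤ current_index ≤ len(current_address), plus every input whose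
-- address is already used (A returns 0 at once, for any index). It excludes the remaining inputs:
-- current_index outside [-len, len] (A raises IndexError) and the remaining negative indices,
-- which are outside the natural domain (A's wraparound double-scan there is accidental).
def Pre_count_addresses (used_addresses : List String) (current_address : String) (current_index : Int) : Prop :=
  (0 ≤ current_index ∧ current_index ≤ PySem.Str.len current_address) ∨
    current_address ∈ used_addresses
instance (used_addresses : List String) (current_address : String) (current_index : Int) : Decidable (Pre_count_addresses used_addresses current_address current_index) := by unfold Pre_count_addresses; infer_instance

def pvWitness_count_addresses : List String × String × Int := (["101", "0X1"], "1X0X", 0)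

def Spec_count_addresses (used_addresses : List String) (current_address : String) (current_index : Int) (out : Int) : Prop := out = count_addresses_alt used_addresses current_address current_index
instance (used_addresses : List String) (current_address : String) (current_index : Int) (out : Int) : Decidable (Spec_count_addresses used_addresses current_address current_index out) := by unfold Spec_count_addresses; infer_instance

-- ===== CLAIM (what is proved, stated in full; the proofs are below) =====
def Claim_equal_count_addresses : Prop := ∀ (used_addresses : List String) (current_address : String) (current_index : Int), Dom_count_addresses used_addresses current_address current_index → Pre_count_addresses used_addresses current_address current_index → Spec_count_addresses used_addresses current_address current_index (count_addresses used_addresses current_address current_index)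

-- ===== LEMMAS AND PROOFS =====

theorem pvBuild_length (a : List Char) (i : Int) (c : Char) (h0 : 0 ≤ i)
    (h1 : i < (a.length : Int)) : (pvBuild a i [c]).length = a.length := by
  unfold pvBuild
  rw [PySem.List.slice_to a h0, PySem.List.slice_from a (by omega)]
  simp
  omega

theorem pvSingletonPrefix (c : Char) (l : List Char) : [c] <+: l ↔ l.head? = some c := by
  cases l with
  | nil => simp
  | cons x t =>
    simp only [List.cons_prefix_cons, List.head?_cons, Option.some.injEq, List.nil_prefix, and_true]
    exact ⟨fun h => h.symm, fun h => h.symm⟩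

theorem pvFind_eq (s : List Char) :
    PySem.Chars.find s ['X'] =
      (match s.findIdx? (fun c => c = 'X') with | none => -1 | some k => (k : Int)) := by
  cases h : s.findIdx? (fun c => c = 'X') with
  | none =>
    rw [List.findIdx?_eq_none_iff] at h
    rw [PySem.Chars.find_eq_neg_one_iff, List.singleton_infix_iff]
    intro hmem
    simpa using h _ hmem
  | some k =>
    obtain ⟨hk, hpk, hmin⟩ := List.findIdx?_eq_some_iff_getElem.1 h
    have hx : s[k] = 'X' := by simpa using hpk
    have hnonneg : 0 ≤ PySem.Chars.find s ['X'] := by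
      rw [PySem.Chars.find_nonneg_iff, List.singleton_infix_iff]
      exact hx ▸ List.getElem_mem hk
    obtain ⟨hpre, hminf⟩ := PySem.Chars.find_spec hnonneg
    have hfk : (PySem.Chars.find s ['X']).toNat ≤ k := by
      by_contra hgt
      exact hminf k (by omega) ((pvSingletonPrefix 'X' _).2 (by rw [List.head?_drop]; simp [hx, hk]))
    have hxf : s[(PySem.Chars.find s ['X']).toNat]? = some 'X' := by
      rw [← List.head?_drop]; exact (pvSingletonPrefix 'X' _).1 hpre
    have hkf : k ≤ (PySem.Chars.find s ['X']).toNat := by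
      by_contra hgt
      have hlt : (PySem.Chars.find s ['X']).toNat < s.length := by omega
      rw [List.getElem?_eq_getElem hlt, Option.some.injEq] at hxf
      exact hmin (PySem.Chars.find s ['X']).toNat (by omega) (by simp [hxf])
    show PySem.Chars.find s ['X'] = (k : Int)
    omega

theorem pvFindFrom_eq (a : List Char) (k : Nat) (hk : k ≤ a.length) :
    PySem.Chars.findFrom a ['X'] (k : Int) none =
      (match (a.drop k).findIdx? (fun c => c = 'X') with | none => -1 | some m => ((k + m : Nat) : Int)) := by
  rw [PySem.Chars.findFrom_natCast a ['X'] k hk, pvFind_eq]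
  cases h : (a.drop k).findIdx? (fun c => c = 'X') with
  | none => simp
  | some m =>
    show (if ((m : Int)) = -1 then (-1 : Int) else (k : Int) + (m : Int)) = ((k + m : Nat) : Int)
    rw [if_neg (by omega)]
    push_cast
    ring

theorem pvFindFrom_bounds (a : List Char) (k : Nat) (hk : k ≤ a.length)
    (hne : PySem.Chars.findFrom a ['X'] (k : Int) none ≠ -1) :
    ∃ m : Nat, PySem.Chars.findFrom a ['X'] (k : Int) none = ((k + m : Nat) : Int) ∧
      k + m < a.length := by
  rw [pvFindFrom_eq a k hk] at hne ⊢
  cases hmm : (a.drop k).findIdx? (fun c => c = 'X') with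
  | none => rw [hmm] at hne; simp at hne
  | some m =>
    obtain ⟨hlt, -, -⟩ := List.findIdx?_eq_some_iff_getElem.1 hmm
    exact ⟨m, rfl, by simp at hlt; omega⟩

-- the stack weight: an upper bound on the number of loop iterations B still performs
def pvStackW : List (List Char × Int) → Nat
  | [] => 0
  | (a, i) :: rest => 3 ^ (((a.length : Int) - i).toNat) + pvStackW rest

-- every stack entry carries an index inside [0, len]
def pvStWF (st : List (List Char × Int)) : Prop := ∀ p ∈ st, 0 ≤ p.2 ∧ p.2 ≤ (p.1.length : Int)

theorem pvGoB_nil (f : Nat) (u : List (List Char)) (c : Int) : pvGoB f u [] c = (u, c) := by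
  cases f <;> rfl

theorem pvGoB_fuel : ∀ (f : Nat) (st : List (List Char × Int)) (u : List (List Char)) (c : Int)
    (f' : Nat), pvStWF st → pvStackW st < f → f ≤ f' → pvGoB f u st c = pvGoB f' u st c := by
  intro f
  induction f with
  | zero => intro st u c f' _ hlt _; exact absurd hlt (Nat.not_lt_zero _)
  | succ g ihg =>
    intro st u c f' hwf hlt hle
    cases st with
    | nil => rw [pvGoB_nil, pvGoB_nil]
    | cons p rest =>
      obtain ⟨a, i⟩ := p
      obtain ⟨g', rfl⟩ : ∃ g', f' = g' + 1 := ⟨f' - 1, by omega⟩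
      have hw : 0 < 3 ^ (((a.length : Int) - i).toNat) := Nat.pow_pos (by omega)
      have hrest : pvStackW rest < g := by
        have : pvStackW ((a, i) :: rest) = 3 ^ (((a.length : Int) - i).toNat) + pvStackW rest := rfl
        omega
      have hwfr : pvStWF rest := fun p hp => hwf p (List.mem_cons_of_mem _ hp)
      show pvGoB (g + 1) u ((a, i) :: rest) c = pvGoB (g' + 1) u ((a, i) :: rest) c
      simp only [pvGoB]
      by_cases hc : PySem.Set.contains u a
      · simp only [hc, if_true]
        exact ihg rest u c g' hwfr hrest (by omega)
      · simp only [hc, Bool.false_eq_true, if_false]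
        by_cases hj : PySem.Chars.findFrom a ['X'] i none = -1
        · simp only [hj, reduceIte]
          exact ihg rest (PySem.Set.add u a) (c + 1) g' hwfr hrest (by omega)
        · rw [if_neg hj, if_neg hj]
          obtain ⟨h0, h1⟩ := hwf (a, i) List.mem_cons_self
          obtain ⟨k, rfl⟩ : ∃ n : Nat, i = (n : Int) := ⟨i.toNat, (Int.toNat_of_nonneg h0).symm⟩
          obtain ⟨m, hm, hmlt⟩ := pvFindFrom_bounds a k (by simpa using h1) hj
          have hb0 : (pvBuild a ((k + m : Nat) : Int) ['0']).length = a.length :=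
            pvBuild_length a _ '0' (by omega) (by omega)
          have hb1 : (pvBuild a ((k + m : Nat) : Int) ['1']).length = a.length :=
            pvBuild_length a _ '1' (by omega) (by omega)
          rw [hm]
          refine ihg _ _ _ g' ?_ ?_ (by omega)
          · intro p hp
            simp only [List.mem_cons] at hp
            rcases hp with rfl | rfl | h
            · exact ⟨by omega, by rw [hb0]; omega⟩
            · exact ⟨by omega, by rw [hb1]; omega⟩
            · exact hwfr _ h
          · show 3 ^ ((((pvBuild a ((k + m : Nat) : Int) ['0']).length : Int) - (((k + m : Nat) : Int) + 1)).toNat)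
              + (3 ^ ((((pvBuild a ((k + m : Nat) : Int) ['1']).length : Int) - (((k + m : Nat) : Int) + 1)).toNat)
              + pvStackW rest) < g
            rw [hb0, hb1]
            have hstack : pvStackW ((a, (k : Int)) :: rest)
                = 3 ^ (((a.length : Int) - (k : Int)).toNat) + pvStackW rest := rfl
            have hwj : (((a.length : Int) - (((k + m : Nat) : Int) + 1)).toNat) + 1
                ≤ (((a.length : Int) - (k : Int)).toNat) := by omega
            have hmono : (3 : Nat) ^ ((((a.length : Int) - (((k + m : Nat) : Int) + 1)).toNat) + 1)
                ≤ 3 ^ (((a.length : Int) - (k : Int)).toNat) := Nat.pow_le_pow_right (by omega) hwj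
            have hp2 : 0 < 3 ^ ((((a.length : Int) - (((k + m : Nat) : Int) + 1)).toNat)) :=
              Nat.pow_pos (by omega)
            rw [pow_succ] at hmono
            omega

theorem pvMain : ∀ (K : Nat) (a : List Char) (i : Int) (u : List (List Char))
    (st : List (List Char × Int)) (c : Int) (fb : Nat), 0 ≤ i → i ≤ (a.length : Int) →
    (((a.length : Int) - i).toNat) ≤ K → pvStWF st → pvStackW ((a, i) :: st) < fb →
    pvGoB fb u ((a, i) :: st) c
      = pvGoB (pvStackW st + 1) (pvGoA ((((a.length : Int) - i).toNat) + 1) u a i).1 st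
          (c + (pvGoA ((((a.length : Int) - i).toNat) + 1) u a i).2) := by
  intro K
  induction K using Nat.strong_induction_on with
  | _ K ih =>
  intro a i u st c fb h0 h1 hK hwf hfb
  have hwpos : 0 < 3 ^ (((a.length : Int) - i).toNat) := Nat.pow_pos (by omega)
  have hstack : pvStackW ((a, i) :: st) = 3 ^ (((a.length : Int) - i).toNat) + pvStackW st := rfl
  obtain ⟨g, rfl⟩ : ∃ g, fb = g + 1 := ⟨fb - 1, by omega⟩
  by_cases hmemu : a ∈ u
  · have hc : PySem.Set.contains u a = true := by simpa [PySem.Set.contains] using hmemu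
    have hA : pvGoA ((((a.length : Int) - i).toNat) + 1) u a i = (u, 0) := by
      simp only [pvGoA, if_pos hc]
    rw [hA]
    show pvGoB (g + 1) u ((a, i) :: st) c = pvGoB (pvStackW st + 1) u st (c + 0)
    simp only [pvGoB, if_pos hc, add_zero]
    exact (pvGoB_fuel (pvStackW st + 1) st u c g hwf (by omega) (by omega)).symm
  · have hc : PySem.Set.contains u a = false := by simpa [PySem.Set.contains] using hmemu
    obtain ⟨k, rfl⟩ : ∃ n : Nat, i = (n : Int) := ⟨i.toNat, (Int.toNat_of_nonneg h0).symm⟩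
    by_cases hlen : (k : Int) = (a.length : Int)
    · have hA : pvGoA ((((a.length : Int) - (k : Int)).toNat) + 1) u a k = (PySem.Set.add u a, 1) := by
        simp only [pvGoA]
        rw [if_neg (by simp [hmemu]), if_pos hlen]
      have hj : PySem.Chars.findFrom a ['X'] (k : Int) none = -1 := by
        rw [pvFindFrom_eq a k (by omega)]
        have : a.drop k = [] := List.drop_eq_nil_of_le (by omega)
        simp [this]
      rw [hA]
      show pvGoB (g + 1) u ((a, (k : Int)) :: st) c = pvGoB (pvStackW st + 1) (PySem.Set.add u a) st (c + 1)
      simp only [pvGoB, if_neg (show ¬ (PySem.Set.contains u a = true) by simp [hmemu]), hj, reduceIte]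
      exact (pvGoB_fuel (pvStackW st + 1) st (PySem.Set.add u a) (c + 1) g hwf (by omega) (by omega)).symm
    · have hklen : k < a.length := by omega
      have hdrop : a.drop k = a[k] :: a.drop (k + 1) := List.drop_eq_getElem_cons hklen
      have hget : PySem.List.pyGetD a (k : Int) ' ' = a[k] := by
        rw [PySem.List.pyGetD_natCast, List.getD_eq_getElem a ' ' hklen]
      have hfa : (((a.length : Int) - ((k : Int) + 1)).toNat) + 1 = (((a.length : Int) - (k : Int)).toNat) := by
        omega
      by_cases hx : a[k] = 'X'
      · -- the popped address has an 'X' at the current position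
        have hj : PySem.Chars.findFrom a ['X'] (k : Int) none = (k : Int) := by
          rw [pvFindFrom_eq a k (by omega), hdrop]
          simp [List.findIdx?_cons, hx]
        have hb0 : (pvBuild a (k : Int) ['0']).length = a.length :=
          pvBuild_length a k '0' (by omega) (by omega)
        have hb1 : (pvBuild a (k : Int) ['1']).length = a.length :=
          pvBuild_length a k '1' (by omega) (by omega)
        have hA : pvGoA ((((a.length : Int) - (k : Int)).toNat) + 1) u a k =
            ((pvGoA (((a.length : Int) - (k : Int)).toNat)
                (pvGoA (((a.length : Int) - (k : Int)).toNat) (PySem.Set.add u a)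
                  (pvBuild a (k : Int) ['0']) ((k : Int) + 1)).1
                (pvBuild a (k : Int) ['1']) ((k : Int) + 1)).1,
             0 + (pvGoA (((a.length : Int) - (k : Int)).toNat) (PySem.Set.add u a)
                   (pvBuild a (k : Int) ['0']) ((k : Int) + 1)).2
               + (pvGoA (((a.length : Int) - (k : Int)).toNat)
                   (pvGoA (((a.length : Int) - (k : Int)).toNat) (PySem.Set.add u a)
                     (pvBuild a (k : Int) ['0']) ((k : Int) + 1)).1
                   (pvBuild a (k : Int) ['1']) ((k : Int) + 1)).2) := by
          simp only [pvGoA]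
          rw [if_neg (by simp [hmemu]), if_neg hlen, if_neg (by omega), if_pos (by rw [hget, hx])]
        have hstWF1 : pvStWF ((pvBuild a (k : Int) ['1'], (k : Int) + 1) :: st) := by
          intro p hp
          simp only [List.mem_cons] at hp
          rcases hp with rfl | h
          · exact ⟨by omega, by rw [hb1]; omega⟩
          · exact hwf _ h
        have hw1 : 0 < 3 ^ (((a.length : Int) - ((k : Int) + 1)).toNat) := Nat.pow_pos (by omega)
        have hstack1 : pvStackW ((pvBuild a (k : Int) ['0'], (k : Int) + 1)
            :: (pvBuild a (k : Int) ['1'], (k : Int) + 1) :: st)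
            = 3 ^ ((((pvBuild a (k : Int) ['0']).length : Int) - ((k : Int) + 1)).toNat)
              + (3 ^ ((((pvBuild a (k : Int) ['1']).length : Int) - ((k : Int) + 1)).toNat) + pvStackW st) := rfl
        have hstack2 : pvStackW ((pvBuild a (k : Int) ['1'], (k : Int) + 1) :: st)
            = 3 ^ ((((pvBuild a (k : Int) ['1']).length : Int) - ((k : Int) + 1)).toNat) + pvStackW st := rfl
        have hmono : (3 : Nat) ^ ((((a.length : Int) - ((k : Int) + 1)).toNat) + 1)
            ≤ 3 ^ (((a.length : Int) - (k : Int)).toNat) := Nat.pow_le_pow_right (by omega) (by omega)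
        rw [pow_succ] at hmono
        show pvGoB (g + 1) u ((a, (k : Int)) :: st) c = _
        simp only [pvGoB, if_neg (show ¬ (PySem.Set.contains u a = true) by simp [hmemu])]
        rw [hj, if_neg (by omega)]
        rw [ih (((a.length : Int) - ((k : Int) + 1)).toNat) (by omega)
          (pvBuild a (k : Int) ['0']) ((k : Int) + 1) (PySem.Set.add u a)
          ((pvBuild a (k : Int) ['1'], (k : Int) + 1) :: st) c g (by omega)
          (by rw [hb0]; omega) (by rw [hb0]) hstWF1
          (by rw [hb0, hb1] at hstack1; omega)]
        rw [ih (((a.length : Int) - ((k : Int) + 1)).toNat) (by omega)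
          (pvBuild a (k : Int) ['1']) ((k : Int) + 1) _ st _ (pvStackW ((pvBuild a (k : Int) ['1'], (k : Int) + 1) :: st) + 1)
          (by omega) (by rw [hb1]; omega) (by rw [hb1]) (fun p hp => hwf p hp)
          (by omega)]
        rw [hA]
        rw [hb0, hb1, hfa]
        ring_nf
      · -- a non-'X' character here: A skips one position, B's find result is unchanged
        have hcast : ((k : Int) + 1) = ((k + 1 : Nat) : Int) := by push_cast; ring
        have hfstep : PySem.Chars.findFrom a ['X'] (k : Int) none
            = PySem.Chars.findFrom a ['X'] ((k : Int) + 1) none := by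
          cases hmm : (a.drop (k + 1)).findIdx? (fun c => c = 'X') with
          | none =>
            have l1 : (a[k] :: a.drop (k + 1)).findIdx? (fun c => c = 'X') = none := by
              rw [List.findIdx?_cons]; simp [hx, hmm]
            rw [pvFindFrom_eq a k (by omega), hdrop, l1, hcast,
              pvFindFrom_eq a (k + 1) (by omega), hmm]
          | some m =>
            have l1 : (a[k] :: a.drop (k + 1)).findIdx? (fun c => c = 'X') = some (m + 1) := by
              rw [List.findIdx?_cons]; simp [hx, hmm]
            rw [pvFindFrom_eq a k (by omega), hdrop, l1, hcast,
              pvFindFrom_eq a (k + 1) (by omega), hmm]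
            show ((k + (m + 1) : Nat) : Int) = ((k + 1 + m : Nat) : Int)
            omega
        have hA : pvGoA ((((a.length : Int) - (k : Int)).toNat) + 1) u a (k : Int)
            = pvGoA ((((a.length : Int) - ((k : Int) + 1)).toNat) + 1) u a ((k : Int) + 1) := by
          conv_lhs => simp only [pvGoA]
          rw [if_neg (by simp [hmemu]), if_neg hlen, if_neg (by omega),
            if_neg (by rw [hget]; exact hx), hfa]
        have hB : pvGoB (g + 1) u ((a, (k : Int)) :: st) c
            = pvGoB (g + 1) u ((a, (k : Int) + 1) :: st) c := by
          simp only [pvGoB, if_neg (show ¬ (PySem.Set.contains u a = true) by simp [hmemu])]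
          rw [hfstep]
        rw [hB, hA]
        exact ih (((a.length : Int) - ((k : Int) + 1)).toNat) (by omega) a ((k : Int) + 1) u st c (g + 1)
          (by omega) (by omega) le_rfl hwf (by
            have : pvStackW ((a, (k : Int) + 1) :: st)
                = 3 ^ (((a.length : Int) - ((k : Int) + 1)).toNat) + pvStackW st := rfl
            have hmono : (3 : Nat) ^ ((((a.length : Int) - ((k : Int) + 1)).toNat))
                ≤ 3 ^ (((a.length : Int) - (k : Int)).toNat) := Nat.pow_le_pow_right (by omega) (by omega)
            omega)

-- ===== VERDICT (by name: the statement is the Claim_ definition above) =====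
theorem count_addresses_spec : Claim_equal_count_addresses := by
  intro u a i _ hpre
  unfold Spec_count_addresses count_addresses count_addresses_alt
  rcases hpre with ⟨h0, h1⟩ | hmem
  · have h1' : i ≤ (a.toList.length : Int) := by simpa using h1
    have hmin : min (((a.toList.length : Int) - i).toNat) (a.toList.length + 1)
        = (((a.toList.length : Int) - i).toNat) := by omega
    rw [hmin]
    rw [pvMain (((a.toList.length : Int) - i).toNat) a.toList i (u.map String.toList) [] 0
      (3 ^ (((a.toList.length : Int) - i).toNat) + 1) h0 h1' le_rfl
      (by intro p hp; cases hp) (by simp [pvStackW])]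
    rw [pvGoB_nil]
    simp
  · have hc : PySem.Set.contains (u.map String.toList) a.toList = true := by
      simp [PySem.Set.contains]
      exact ⟨a, hmem, rfl⟩
    simp only [pvGoA, pvGoB, if_pos hc, pvGoB_nil]
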